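-- pv_equiv track=rewrite | github.com/MihajloMilojevic/FTN | II_godina/IV_semestar/Upravljanje_informacijama/vezbe/07_MapReduce_resenje/transactions_map_reduce.py | reduce_1
-- ===== SOURCE A (Python) =====
-- def dict_to_list_of_tuples(dict):
--     list_of_tuples = []
--
--     for key, value in dict.items():
--         list_of_tuples.append((key,value))
--
--     return list_of_tuples
--
-- def reduce_1(data):
--     max_values = {}
--     for pair in data:
--         if  pair[0] in max_values:
--             max_values[pair[0]] = max(pair[1], max_values[pair[0]])
--         else:
--             max_values[pair[0]]=pair[1]
--     return dict_to_list_of_tuples(max_values)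
-- ===== SOURCE B (Python) =====
-- # Group-then-reduce (map/shuffle/reduce style): phase 1 groups all values per key,
-- # phase 2 computes max per group. Same first-occurrence key order as A.
-- def reduce_1(data):
--     groups = {}
--     for key, value in data:
--         groups.setdefault(key, []).append(value)
--     result = []
--     for key, values in groups.items():
--         result.append((key, max(values)))
--     return result
-- ===== Notes on version B (the rewrite author's own statement) =====
-- stated objective: alternative
-- what changed: Single running-max dict replaced by a two-phase group-then-reduce: first build a dict of per-key value lists, then a separate pass takes max of each group.
import Mathlib
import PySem

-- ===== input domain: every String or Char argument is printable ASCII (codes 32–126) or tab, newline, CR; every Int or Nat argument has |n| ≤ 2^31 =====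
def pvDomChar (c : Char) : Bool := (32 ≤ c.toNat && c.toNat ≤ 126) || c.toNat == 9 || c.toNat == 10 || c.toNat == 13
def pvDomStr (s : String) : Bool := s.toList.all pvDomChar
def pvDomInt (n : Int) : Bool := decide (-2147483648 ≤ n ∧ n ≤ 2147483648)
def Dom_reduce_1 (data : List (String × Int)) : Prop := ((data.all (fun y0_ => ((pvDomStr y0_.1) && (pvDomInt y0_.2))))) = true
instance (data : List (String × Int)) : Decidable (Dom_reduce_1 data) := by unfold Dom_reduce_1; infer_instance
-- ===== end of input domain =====

-- B replaces A's single running-max dict by a two-phase group-then-reduce (group all values per key, then max per group); alternative decomposition, same result.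


-- ===== PORT A =====
-- helper: appends each (key, value) item of the dict to a fresh list
def dict_to_list_of_tuples (d : PySem.Dict String Int) : List (String × Int) :=
  d.items.foldl (fun acc kv => acc ++ [kv]) []

def reduce_1 (data : List (String × Int)) : List (String × Int) :=
  let max_values := data.foldl
    (fun d pair =>
      if d.contains pair.1 then
        -- max_values[pair[0]]: the key is present on this branch, so getD's default is never used
        d.insert pair.1 (max pair.2 (d.getD pair.1 0))
      else
        d.insert pair.1 pair.2)
    PySem.Dict.empty
  dict_to_list_of_tuples max_values

-- ===== PORT B =====
def reduce_1_alt (data : List (String × Int)) : List (String × Int) :=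
  -- phase 1: group all values per key (groups.setdefault(key, []).append(value) ≡ modify key [] (· ++ [value]))
  let groups := data.foldl (fun d p => d.modify p.1 [] (fun vs => vs ++ [p.2])) PySem.Dict.empty
  -- phase 2: reduce each group with max(values); group lists are nonempty, so max? is always some
  groups.items.foldl (fun acc kv => acc ++ [(kv.1, (PySem.List.max? kv.2 id).getD 0)]) []

-- ===== PRECONDITION & SPEC =====
def Spec_reduce_1 (data : List (String × Int)) (out : List (String × Int)) : Prop := out = reduce_1_alt data
instance (data : List (String × Int)) (out : List (String × Int)) : Decidable (Spec_reduce_1 data out) := by unfold Spec_reduce_1; infer_instance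

-- ===== CLAIM (what is proved, stated in full; the proofs are below) =====
def Claim_equal_reduce_1 : Prop := ∀ (data : List (String × Int)), Dom_reduce_1 data → Spec_reduce_1 data (reduce_1 data)

-- ===== LEMMAS AND PROOFS =====

-- the accumulator step of PySem.List.max? with key = id
def maxStep (acc : Option Int) (x : Int) : Option Int :=
  match acc with
  | none => some x
  | some m => if m < x then some x else some m

-- one step of A's loop (in insert-of-key form), seen through get? at an arbitrary key k
lemma stepA_get? (d : PySem.Dict String Int) (p : String × Int) (k : String) :
    (d.insert p.1 (if d.contains p.1 then max p.2 (d.getD p.1 0) else p.2)).get? k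
      = if p.1 == k then maxStep (d.get? k) p.2 else d.get? k := by
  rw [PySem.Dict.get?_insert]
  by_cases hk : k = p.1
  · subst hk
    cases h : d.get? p.1 with
    | none =>
      have hc : d.contains p.1 = false := by rw [PySem.Dict.contains_eq_isSome_get?, h]; rfl
      simp [maxStep, hc]
    | some a =>
      have hc : d.contains p.1 = true := by rw [PySem.Dict.contains_eq_isSome_get?, h]; rfl
      have hg : d.getD p.1 0 = a := by rw [PySem.Dict.getD_eq_get?_getD, h]; rfl
      simp only [maxStep, beq_self_eq_true, if_true, hc, hg, max_def]
      split_ifs <;> first | rfl | (congr 1; omega)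
  · have hbk : (p.1 == k) = false := by
      simp only [beq_eq_false_iff_ne]; exact fun h => hk h.symm
    simp [hk, hbk]

lemma foldA_get? (l : List (String × Int)) (d : PySem.Dict String Int) (k : String) :
    (l.foldl (fun d x => d.insert x.1 (if d.contains x.1 then max x.2 (d.getD x.1 0) else x.2)) d).get? k
      = ((l.filter (fun p => p.1 == k)).map (fun p => p.2)).foldl maxStep (d.get? k) := by
  induction l generalizing d with
  | nil => rfl
  | cons p rest ih =>
    simp only [List.foldl_cons, List.filter_cons]
    by_cases h : (p.1 == k) = true
    · simp only [h, if_true, List.map_cons, List.foldl_cons, ih, stepA_get?]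
    · rw [ih, stepA_get?]
      simp [h]

lemma max?_eq_foldl (vs : List Int) :
    PySem.List.max? vs id = vs.foldl maxStep none := by
  simp only [PySem.List.max?, id_eq]
  exact PySem.List.foldl_congr_mem vs _ maxStep none
    (fun acc x _ => by cases acc <;> simp [maxStep])

theorem reduce_1_eq_alt (data : List (String × Int)) :
    reduce_1 data = reduce_1_alt data := by
  unfold reduce_1 reduce_1_alt dict_to_list_of_tuples
  have hstep : ∀ (acc : PySem.Dict String Int), ∀ x ∈ data,
      (if acc.contains x.1 then acc.insert x.1 (max x.2 (acc.getD x.1 0)) else acc.insert x.1 x.2)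
        = acc.insert x.1 (if acc.contains x.1 then max x.2 (acc.getD x.1 0) else x.2) := by
    intro acc x _; by_cases h : acc.contains x.1 <;> simp [h]
  rw [PySem.List.foldl_congr_mem data _ _ PySem.Dict.empty hstep]
  set maxd := data.foldl (fun d x => d.insert x.1 (if d.contains x.1 then max x.2 (d.getD x.1 0) else x.2)) PySem.Dict.empty with hmaxd
  set grp := data.foldl (fun d p => d.modify p.1 [] (fun vs => vs ++ [p.2])) PySem.Dict.empty with hgrp
  rw [PySem.List.foldl_append_singleton, PySem.List.foldl_append_singleton_eq_map]
  simp only [List.nil_append]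
  have hndA : maxd.keys.Nodup := by
    rw [hmaxd]
    exact PySem.Dict.nodup_keys_foldl_insert_key data (fun p => p.1) _ _ (by simp [PySem.Dict.keys_empty])
  have hndG : grp.keys.Nodup := by
    rw [hgrp]
    exact PySem.Dict.nodup_keys_foldl_modify_key data (fun p => p.1) [] _ _ (by simp [PySem.Dict.keys_empty])
  have hkeys : maxd.keys = grp.keys := by
    rw [hmaxd, hgrp]
    rw [PySem.Dict.keys_foldl_insert_key data (fun p => p.1)]
    rw [PySem.Dict.keys_foldl_modify_key data (fun p => p.1)]
    rfl
  rw [PySem.Dict.items_eq_map_keys maxd hndA 0, PySem.Dict.items_eq_map_keys grp hndG [], hkeys]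
  rw [List.map_map]
  apply List.map_congr_left
  intro k _
  simp only [Function.comp]
  congr 1
  have h1 : maxd.getD k 0 = (maxd.get? k).getD 0 := PySem.Dict.getD_eq_get?_getD _ _ _
  have h2 : grp.getD k [] = (data.filter (fun p => p.1 == k)).map (fun p => p.2) := by
    rw [hgrp, PySem.Dict.getD_foldl_modify_append data PySem.Dict.empty k]
    simp [PySem.Dict.getD_empty]
  rw [h1, hmaxd, foldA_get?, PySem.Dict.get?_empty, h2, max?_eq_foldl]

-- ===== VERDICT (by name: the statement is the Claim_ definition above) =====
theorem reduce_1_spec : Claim_equal_reduce_1 := by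
  intro data _
  unfold Spec_reduce_1
  exact reduce_1_eq_alt data
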